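-- pv_equiv track=rewrite | github.com/Dyr-El/the_song_of_ducks_and_dragons | quest_6_2.py | all_mentors
-- ===== SOURCE A (Python) =====
-- def all_mentors(data):
--     total = 0
--     mentors = { 'A': 0, 'B': 0, 'C': 0 }
--     for c in data:
--         if 'a' <= c <= 'c':
--             total += mentors[chr(ord('A') + (ord(c) - ord('a')))]
--         elif 'A' <= c <= 'C':
--             mentors[c] += 1
--     return total
-- ===== SOURCE B (Python) =====
-- def all_mentors(data):
--     # Right-to-left scan: count lowercase a/b/c seen so far (the suffix);
--     # each uppercase A/B/C contributes the count of its matching lowercase.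
--     total = na = nb = nc = 0
--     for c in reversed(data):
--         if c == 'A':
--             total += na
--         elif c == 'B':
--             total += nb
--         elif c == 'C':
--             total += nc
--         elif c == 'a':
--             na += 1
--         elif c == 'b':
--             nb += 1
--         elif c == 'c':
--             nc += 1
--     return total
-- ===== Notes on version B (the rewrite author's own statement) =====
-- stated objective: alternative
-- what changed: B scans the string right-to-left with three plain integer counters of lowercase a/b/c seen in the suffix, adding the matching counter at each uppercase A/B/C, instead of A's left-to-right scan maintaining a dict of uppercase counts and adding on each lowercase.
import Mathlib
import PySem

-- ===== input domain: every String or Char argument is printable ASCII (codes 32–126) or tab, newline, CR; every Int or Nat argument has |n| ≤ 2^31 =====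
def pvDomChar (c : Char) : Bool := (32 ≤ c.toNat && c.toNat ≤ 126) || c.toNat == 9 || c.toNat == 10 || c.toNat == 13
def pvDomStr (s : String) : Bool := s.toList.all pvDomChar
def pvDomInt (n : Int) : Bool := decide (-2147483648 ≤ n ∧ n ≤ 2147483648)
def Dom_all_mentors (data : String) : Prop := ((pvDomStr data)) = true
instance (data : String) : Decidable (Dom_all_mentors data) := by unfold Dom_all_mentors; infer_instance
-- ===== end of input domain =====

-- B replaces A's left-to-right scan with a dict of uppercase counts by a right-to-left scan
-- with three plain counters of lowercase letters seen in the suffix (alternative decomposition).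


-- ===== PORT A =====
def all_mentors_step (st : Int × PySem.Dict Char Int) (c : Char) : Int × PySem.Dict Char Int :=
  if 'a' ≤ c ∧ c ≤ 'c' then
    (st.1 + st.2.getD (Char.ofNat (65 + (c.toNat - 97))) 0, st.2)
  else if 'A' ≤ c ∧ c ≤ 'C' then
    (st.1, st.2.modify c 0 (· + 1))
  else st

def all_mentors (data : String) : Int :=
  (data.toList.foldl all_mentors_step
    (0, PySem.Dict.ofList [('A', 0), ('B', 0), ('C', 0)])).1

-- ===== PORT B =====
def all_mentors_alt_step (st : Int × Int × Int × Int) (c : Char) : Int × Int × Int × Int :=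
  if c = 'A' then (st.1 + st.2.1, st.2)
  else if c = 'B' then (st.1 + st.2.2.1, st.2)
  else if c = 'C' then (st.1 + st.2.2.2, st.2)
  else if c = 'a' then (st.1, st.2.1 + 1, st.2.2)
  else if c = 'b' then (st.1, st.2.1, st.2.2.1 + 1, st.2.2.2)
  else if c = 'c' then (st.1, st.2.1, st.2.2.1, st.2.2.2 + 1)
  else st

def all_mentors_alt (data : String) : Int :=
  (data.toList.reverse.foldl all_mentors_alt_step (0, 0, 0, 0)).1

-- ===== PRECONDITION & SPEC =====
def Spec_all_mentors (data : String) (out : Int) : Prop := out = all_mentors_alt data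
instance (data : String) (out : Int) : Decidable (Spec_all_mentors data out) := by unfold Spec_all_mentors; infer_instance

-- ===== CLAIM (what is proved, stated in full; the proofs are below) =====
def Claim_equal_all_mentors : Prop := ∀ (data : String), Dom_all_mentors data → Spec_all_mentors data (all_mentors data)

-- ===== LEMMAS AND PROOFS =====

-- B's reversed-loop as a foldr over the original list
theorem alt_foldr (l : List Char) (init : Int × Int × Int × Int) :
    l.reverse.foldl all_mentors_alt_step init
      = l.foldr (fun c st => all_mentors_alt_step st c) init := by
  rw [List.foldl_reverse]

-- the dict A maintains, as a function of three counters
def dict3 (ua ub uc : Int) : PySem.Dict Char Int :=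
  PySem.Dict.mk [('A', ua), ('B', ub), ('C', uc)]

theorem lower_cases {c : Char} (h1 : 'a' ≤ c) (h2 : c ≤ 'c') :
    c = 'a' ∨ c = 'b' ∨ c = 'c' := by
  have h1' : 97 ≤ c.toNat := UInt32.le_iff_toNat_le.mp (Char.le_def.mp h1)
  have h2' : c.toNat ≤ 99 := UInt32.le_iff_toNat_le.mp (Char.le_def.mp h2)
  have h3 : c.toNat = 97 ∨ c.toNat = 98 ∨ c.toNat = 99 := by omega
  have h4 : c = Char.ofNat c.toNat := (Char.ofNat_toNat c).symm
  rcases h3 with h | h | h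
  · left; rw [h4, h]
  · right; left; rw [h4, h]
  · right; right; rw [h4, h]

theorem upper_cases {c : Char} (h1 : 'A' ≤ c) (h2 : c ≤ 'C') :
    c = 'A' ∨ c = 'B' ∨ c = 'C' := by
  have h1' : 65 ≤ c.toNat := UInt32.le_iff_toNat_le.mp (Char.le_def.mp h1)
  have h2' : c.toNat ≤ 67 := UInt32.le_iff_toNat_le.mp (Char.le_def.mp h2)
  have h3 : c.toNat = 65 ∨ c.toNat = 66 ∨ c.toNat = 67 := by omega
  have h4 : c = Char.ofNat c.toNat := (Char.ofNat_toNat c).symm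
  rcases h3 with h | h | h
  · left; rw [h4, h]
  · right; left; rw [h4, h]
  · right; right; rw [h4, h]

-- main invariant: A's running total with uppercase counts (ua,ub,uc) against B's foldr
theorem stepA_a (t ua ub uc : Int) :
    all_mentors_step (t, dict3 ua ub uc) 'a' = (t + ua, dict3 ua ub uc) := rfl
theorem stepA_b (t ua ub uc : Int) :
    all_mentors_step (t, dict3 ua ub uc) 'b' = (t + ub, dict3 ua ub uc) := rfl
theorem stepA_c (t ua ub uc : Int) :
    all_mentors_step (t, dict3 ua ub uc) 'c' = (t + uc, dict3 ua ub uc) := rfl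
theorem stepA_A (t ua ub uc : Int) :
    all_mentors_step (t, dict3 ua ub uc) 'A' = (t, dict3 (ua + 1) ub uc) := rfl
theorem stepA_B (t ua ub uc : Int) :
    all_mentors_step (t, dict3 ua ub uc) 'B' = (t, dict3 ua (ub + 1) uc) := rfl
theorem stepA_C (t ua ub uc : Int) :
    all_mentors_step (t, dict3 ua ub uc) 'C' = (t, dict3 ua ub (uc + 1)) := rfl
theorem stepA_other {c : Char} (h1 : ¬ ('a' ≤ c ∧ c ≤ 'c')) (h2 : ¬ ('A' ≤ c ∧ c ≤ 'C'))
    (st : Int × PySem.Dict Char Int) : all_mentors_step st c = st := by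
  simp [all_mentors_step, h1, h2]

theorem stepB_A (st : Int × Int × Int × Int) :
    all_mentors_alt_step st 'A' = (st.1 + st.2.1, st.2) := rfl
theorem stepB_B (st : Int × Int × Int × Int) :
    all_mentors_alt_step st 'B' = (st.1 + st.2.2.1, st.2) := rfl
theorem stepB_C (st : Int × Int × Int × Int) :
    all_mentors_alt_step st 'C' = (st.1 + st.2.2.2, st.2) := rfl
theorem stepB_a (st : Int × Int × Int × Int) :
    all_mentors_alt_step st 'a' = (st.1, st.2.1 + 1, st.2.2) := rfl
theorem stepB_b (st : Int × Int × Int × Int) :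
    all_mentors_alt_step st 'b' = (st.1, st.2.1, st.2.2.1 + 1, st.2.2.2) := rfl
theorem stepB_c (st : Int × Int × Int × Int) :
    all_mentors_alt_step st 'c' = (st.1, st.2.1, st.2.2.1, st.2.2.2 + 1) := rfl
theorem stepB_other {c : Char} (hA : c ≠ 'A') (hB : c ≠ 'B') (hC : c ≠ 'C')
    (ha : c ≠ 'a') (hb : c ≠ 'b') (hc : c ≠ 'c')
    (st : Int × Int × Int × Int) : all_mentors_alt_step st c = st := by
  simp [all_mentors_alt_step, hA, hB, hC, ha, hb, hc]

theorem main_inv (l : List Char) (t ua ub uc : Int) :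
    (l.foldl all_mentors_step (t, dict3 ua ub uc)).1
      = t + (l.foldr (fun c st => all_mentors_alt_step st c) (0, 0, 0, 0)).1
          + ua * (l.foldr (fun c st => all_mentors_alt_step st c) (0, 0, 0, 0)).2.1
          + ub * (l.foldr (fun c st => all_mentors_alt_step st c) (0, 0, 0, 0)).2.2.1
          + uc * (l.foldr (fun c st => all_mentors_alt_step st c) (0, 0, 0, 0)).2.2.2 := by
  induction l generalizing t ua ub uc with
  | nil => simp
  | cons c l ih =>
    simp only [List.foldl_cons, List.foldr_cons]
    by_cases hl : 'a' ≤ c ∧ c ≤ 'c'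
    · rcases lower_cases hl.1 hl.2 with rfl | rfl | rfl
      · simp only [stepA_a, stepB_a, ih]; ring
      · simp only [stepA_b, stepB_b, ih]; ring
      · simp only [stepA_c, stepB_c, ih]; ring
    · by_cases hu : 'A' ≤ c ∧ c ≤ 'C'
      · rcases upper_cases hu.1 hu.2 with rfl | rfl | rfl
        · simp only [stepA_A, stepB_A, ih]; ring
        · simp only [stepA_B, stepB_B, ih]; ring
        · simp only [stepA_C, stepB_C, ih]; ring
      · have ha : c ≠ 'A' := by rintro rfl; exact hu ⟨le_refl _, by decide⟩
        have hb : c ≠ 'B' := by rintro rfl; exact hu ⟨by decide, by decide⟩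
        have hc : c ≠ 'C' := by rintro rfl; exact hu ⟨by decide, le_refl _⟩
        have ha' : c ≠ 'a' := by rintro rfl; exact hl ⟨le_refl _, by decide⟩
        have hb' : c ≠ 'b' := by rintro rfl; exact hl ⟨by decide, by decide⟩
        have hc' : c ≠ 'c' := by rintro rfl; exact hl ⟨by decide, le_refl _⟩
        rw [stepA_other hl hu, stepB_other ha hb hc ha' hb' hc']
        exact ih t ua ub uc

-- ===== VERDICT (by name: the statement is the Claim_ definition above) =====
theorem all_mentors_spec : Claim_equal_all_mentors := by
  intro data _
  show all_mentors data = all_mentors_alt data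
  unfold all_mentors all_mentors_alt
  rw [alt_foldr]
  have := main_inv data.toList 0 0 0 0
  simpa [dict3, PySem.Dict.ofList] using this
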